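-- pv_equiv track=rewrite | github.com/lang-bmb/lang-bmb | ecosystem/ai-proof/scripts/strip_contracts.py | strip_contracts
-- ===== SOURCE A (Python) =====
-- def strip_contracts(source: str) -> str:
--     """Remove pre/post contract clauses from BMB source code."""
--     lines = source.split("\n")
--     result = []
--     i = 0
--     while i < len(lines):
--         stripped = lines[i].strip()
--         if stripped.startswith("pre ") or stripped.startswith("post "):
--             i += 1
--             while i < len(lines) and lines[i].strip().startswith("and "):
--                 i += 1
--             continue
--         result.append(lines[i])
--         i += 1
--     return "\n".join(result)
-- ===== SOURCE B (Python) =====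
-- def strip_contracts(source: str) -> str:
--     """Remove pre/post contract clauses from BMB source code."""
--     lines = source.split("\n")
--     # Stage 1: group lines into blocks: each 'and '-continuation attaches to the
--     # block of the line above it; every other line opens a new block.
--     blocks = []
--     for line in lines:
--         if blocks and line.strip().startswith("and "):
--             blocks[-1].append(line)
--         else:
--             blocks.append([line])
--     # Stage 2: keep only blocks whose head line is not a pre/post clause.
--     kept = [b for b in blocks
--             if not (b[0].strip().startswith("pre ")
--                     or b[0].strip().startswith("post "))]
--     # Stage 3: flatten and rejoin.
--     return "\n".join(line for b in kept for line in b)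
-- ===== Notes on version B (the rewrite author's own statement) =====
-- stated objective: alternative
-- what changed: Instead of A's stateful index scan with a nested index-advancing inner while, B first groups the lines into continuation blocks (a line plus its 'and ' continuations), then filters out whole blocks headed by a pre/post clause, then flattens and rejoins.
import Mathlib
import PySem

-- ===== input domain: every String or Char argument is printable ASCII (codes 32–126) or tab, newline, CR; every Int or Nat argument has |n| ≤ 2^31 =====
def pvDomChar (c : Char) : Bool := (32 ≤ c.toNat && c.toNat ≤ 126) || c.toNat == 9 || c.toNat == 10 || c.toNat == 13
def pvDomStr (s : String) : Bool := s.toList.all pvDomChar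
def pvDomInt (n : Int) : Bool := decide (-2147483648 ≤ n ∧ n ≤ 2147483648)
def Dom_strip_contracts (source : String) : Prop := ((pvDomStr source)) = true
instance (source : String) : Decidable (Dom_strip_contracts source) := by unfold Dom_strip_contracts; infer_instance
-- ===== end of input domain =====

-- B replaces A's stateful index scan (outer while with a nested index-advancing inner while)
-- by three staged passes: group the lines into continuation blocks, filter out the blocks
-- headed by a pre/post clause, flatten; same result ('alternative' objective, same cost).

-- shared tiny predicates (the Python string tests, used verbatim by both ports)
def pvIsPP (l : String) : Bool :=
  PySem.Str.startswith (PySem.Str.strip l) "pre " || PySem.Str.startswith (PySem.Str.strip l) "post "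
def pvIsAnd (l : String) : Bool :=
  PySem.Str.startswith (PySem.Str.strip l) "and "

-- ===== PORT A =====
-- A's outer while over index i, with the inner while advancing i over 'and ' lines,
-- transliterated as recursion on the suffix of lines still to process (the inner while is dropWhile).
def stripAGo : List String → List String
  | [] => []
  | l :: rest =>
    if pvIsPP l then stripAGo (rest.dropWhile pvIsAnd)
    else l :: stripAGo rest
termination_by ls => ls.length
decreasing_by
  · exact Nat.lt_succ_of_le (List.length_dropWhile_le _ _)
  · simp

def strip_contracts (source : String) : String :=
  PySem.Str.join "\n" (stripAGo (((PySem.Str.split? source "\n").getD [])))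

-- ===== PORT B =====
-- stage 1 step: an 'and '-continuation is appended to the last block (blocks[-1].append),
-- any other line opens a new block
def stepBlk (blocks : List (List String)) (l : String) : List (List String) :=
  if !blocks.isEmpty && pvIsAnd l then blocks.dropLast ++ [blocks.getLastD [] ++ [l]]
  else blocks ++ [[l]]

def strip_contracts_alt (source : String) : String :=
  PySem.Str.join "\n"
    (((((PySem.Str.split? source "\n").getD []).foldl stepBlk []).filter
      (fun b => !pvIsPP (b.headD ""))).flatten)

-- ===== PRECONDITION & SPEC =====
def Spec_strip_contracts (source : String) (out : String) : Prop := out = strip_contracts_alt source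
instance (source : String) (out : String) : Decidable (Spec_strip_contracts source out) := by unfold Spec_strip_contracts; infer_instance

-- ===== CLAIM (what is proved, stated in full; the proofs are below) =====
def Claim_equal_strip_contracts : Prop := ∀ (source : String), Dom_strip_contracts source → Spec_strip_contracts source (strip_contracts source)

-- ===== LEMMAS AND PROOFS =====

-- an 'and ' line is never a pre/post line (the stripped line cannot start with both)
theorem pvIsPP_of_isAnd (l : String) (h : pvIsAnd l = true) : pvIsPP l = false := by
  unfold pvIsAnd at h
  rw [PySem.Str.startswith_eq, PySem.Chars.startswith_iff] at h
  obtain ⟨t, ht⟩ := h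
  rw [pvIsPP, Bool.or_eq_false_iff]
  constructor <;>
  · rw [PySem.Str.startswith_eq, Bool.eq_false_iff]
    intro hp
    rw [PySem.Chars.startswith_iff] at hp
    obtain ⟨u, hu⟩ := hp
    rw [← ht] at hu
    simp at hu

-- recursive characterization of stage 1: blocks of a head line plus its 'and ' continuations
def blocksGo : List String → List (List String)
  | [] => []
  | l :: rest => (l :: rest.takeWhile pvIsAnd) :: blocksGo (rest.dropWhile pvIsAnd)
termination_by ls => ls.length
decreasing_by
  exact Nat.lt_succ_of_le (List.length_dropWhile_le _ _)

theorem foldl_stepBlk_concat (lines : List String) :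
    ∀ (bs : List (List String)) (b : List String), b ≠ [] →
    lines.foldl stepBlk (bs ++ [b]) =
      bs ++ (b ++ lines.takeWhile pvIsAnd) :: blocksGo (lines.dropWhile pvIsAnd) := by
  induction lines with
  | nil => intro bs b hb; simp [blocksGo]
  | cons l rest ih =>
    intro bs b hb
    by_cases h : pvIsAnd l = true
    · have hs : stepBlk (bs ++ [b]) l = bs ++ [b ++ [l]] := by
        simp [stepBlk, h]
      rw [List.foldl_cons, hs, ih bs (b ++ [l]) (by simp)]
      simp [h]
    · have hs : stepBlk (bs ++ [b]) l = (bs ++ [b]) ++ [[l]] := by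
        simp [stepBlk, h]
      rw [List.foldl_cons, hs, ih (bs ++ [b]) [l] (by simp)]
      simp [h, blocksGo]

theorem foldl_stepBlk_nil (lines : List String) :
    lines.foldl stepBlk [] = blocksGo lines := by
  cases lines with
  | nil => simp [blocksGo]
  | cons l rest =>
    have hs : stepBlk [] l = [[l]] := by simp [stepBlk]
    rw [List.foldl_cons, hs,
      show ([[l]] : List (List String)) = [] ++ [[l]] from rfl,
      foldl_stepBlk_concat rest [] [l] (by simp)]
    simp [blocksGo]

-- A keeps a run of 'and ' lines untouched (they are never pre/post lines)
theorem stripAGo_and_prefix (pre : List String) (tail : List String)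
    (h : ∀ x ∈ pre, pvIsAnd x = true) : stripAGo (pre ++ tail) = pre ++ stripAGo tail := by
  induction pre with
  | nil => simp
  | cons x xs ih =>
    have hx : pvIsPP x = false := pvIsPP_of_isAnd x (h x (by simp))
    rw [List.cons_append, stripAGo, if_neg (by simp [hx]), ih (fun y hy => h y (by simp [hy]))]
    rfl

-- filtering the blocks and flattening is exactly A's scan
theorem flatten_filter_blocksGo (lines : List String) :
    ((blocksGo lines).filter (fun b => !pvIsPP (b.headD ""))).flatten = stripAGo lines := by
  induction lines using blocksGo.induct with
  | case1 => simp [blocksGo, stripAGo]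
  | case2 l rest ih =>
    rw [blocksGo]
    by_cases h : pvIsPP l = true
    · rw [List.filter_cons_of_neg (by simp [h]), ih, stripAGo, if_pos h]
    · rw [List.filter_cons_of_pos (by simp [h]), List.flatten_cons, ih, stripAGo,
        if_neg (by simp at h; simp [h]),
        show rest = rest.takeWhile pvIsAnd ++ rest.dropWhile pvIsAnd from
          (List.takeWhile_append_dropWhile).symm,
        stripAGo_and_prefix _ _ (fun x hx => List.mem_takeWhile_imp hx)]
      simp

-- ===== VERDICT (by name: the statement is the Claim_ definition above) =====
theorem strip_contracts_spec : Claim_equal_strip_contracts := by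
  intro source _
  unfold Spec_strip_contracts strip_contracts strip_contracts_alt
  rw [foldl_stepBlk_nil, flatten_filter_blocksGo]
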